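-- pv_equiv track=rewrite | github.com/swathypatel/swathypatel | sliding_window4/7_1100_k_strings__no_repititions.py | substring_no_repititions1
-- ===== SOURCE A (Python) =====
-- def substring_no_repititions1(s, k):
--     max_count = 0
--     if k > len(s):
--         return max_count
--     hmap = {}
--     for i in range(k):
--         if s[i] in hmap:
--             hmap[s[i]] += 1
--         else:
--             hmap[s[i]] = 1
--     if len(hmap) == k: # means everything char is unique.
--         max_count += 1
--
--     # First append the current char
--     # reduce -1 to s[i-k] char
--     # if s[i-k] == 0, remove from dict
--     # calculate length
--     for i in range(k, len(s)):
--         if s[i] in hmap: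
--             hmap[s[i]] += 1
--         else:
--             hmap[s[i]] = 1
--         hmap[s[i-k]] -= 1
--         if hmap[s[i-k]] == 0:
--             del hmap[s[i-k]]
--         if len(hmap) == k:
--             max_count += 1
--
--     return max_count
-- ===== SOURCE B (Python) =====
-- def substring_no_repititions1(s, k):
--     if k > len(s) or k < 0:
--         return 0
--     count = 0
--     for i in range(len(s) - k + 1):
--         if len(set(s[i:i+k])) == k:
--             count += 1
--     return count
-- ===== Notes on version B (the rewrite author's own statement) =====
-- stated objective: simpler
-- what changed: Replaces the incremental dict-maintained sliding window (insert new char, decrement/delete old char, compare dict size) by independent per-window rescans: count i with len(set(s[i:i+k])) == k; no state is carried between windows.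
-- crash fix: For k < 0 A raises (KeyError or IndexError from the negative-index window bookkeeping) while B returns 0 (no set has negative size); the checkable region is stated as -1000 <= k < 0 where B's rescan loop is feasible. — e.g. on substring_no_repititions1("ab", -1): A raises KeyError, B returns 0
import Mathlib
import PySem

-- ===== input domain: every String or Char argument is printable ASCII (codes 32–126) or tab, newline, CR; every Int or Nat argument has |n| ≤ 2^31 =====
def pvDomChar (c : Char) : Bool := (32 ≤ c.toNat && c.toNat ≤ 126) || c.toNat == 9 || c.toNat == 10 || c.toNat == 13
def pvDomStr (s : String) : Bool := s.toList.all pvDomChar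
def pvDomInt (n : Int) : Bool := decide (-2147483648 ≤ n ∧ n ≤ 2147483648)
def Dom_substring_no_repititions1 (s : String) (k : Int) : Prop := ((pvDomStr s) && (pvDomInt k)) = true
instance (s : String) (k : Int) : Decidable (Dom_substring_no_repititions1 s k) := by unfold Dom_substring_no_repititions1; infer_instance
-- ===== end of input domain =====

-- B replaces A's incremental dict-maintained sliding window by independent per-window
-- distinct-count rescans (simpler; not faster). Proven equal to A for all k >= 0.


-- ===== PORT A =====
-- 'if s[i] in hmap: hmap[s[i]] += 1 else: hmap[s[i]] = 1'
def pvAddChar (h : PySem.Dict Char Int) (c : Char) : PySem.Dict Char Int :=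
  if h.contains c then h.insert c (h.getD c 0 + 1) else h.insert c 1

-- the dict bookkeeping of one iteration of A's second loop (add new char, decrement old, delete at 0)
def pvDictStep (h : PySem.Dict Char Int) (c cold : Char) : PySem.Dict Char Int :=
  let h1 := pvAddChar h c
  let h2 := h1.insert cold (h1.getD cold 0 - 1)
  if h2.getD cold 0 = 0 then h2.erase cold else h2

def pvStepA (cs : List Char) (k : Int) (st : PySem.Dict Char Int × Int) (i : Int) :
    PySem.Dict Char Int × Int :=
  let h := pvDictStep st.1 (PySem.List.pyGetD cs i ' ') (PySem.List.pyGetD cs (i - k) ' ')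
  (h, if (h.size : Int) = k then st.2 + 1 else st.2)

def substring_no_repititions1 (s : String) (k : Int) : Int :=
  let cs := s.toList
  if k > (cs.length : Int) then 0
  else
    let hmap := (PySem.List.pyRange 0 k 1).foldl
      (fun h i => pvAddChar h (PySem.List.pyGetD cs i ' ')) PySem.Dict.empty
    let max_count : Int := if (hmap.size : Int) = k then 1 else 0
    ((PySem.List.pyRange k (cs.length : Int) 1).foldl (pvStepA cs k) (hmap, max_count)).2

-- ===== PORT B =====
def substring_no_repititions1_alt (s : String) (k : Int) : Int :=
  let cs := s.toList
  if k > (cs.length : Int) ∨ k < 0 then 0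
  else
    (PySem.List.pyRange 0 ((cs.length : Int) - k + 1) 1).foldl
      (fun count i =>
        if ((PySem.Set.ofList (PySem.List.slice cs (some i) (some (i + k)))).length : Int) = k
        then count + 1 else count) 0

-- ===== PRECONDITION & SPEC =====
-- Pre_ excludes k < 0, on which A always raises (KeyError/IndexError in the window bookkeeping).
def Pre_substring_no_repititions1 (s : String) (k : Int) : Prop := 0 ≤ k
instance (s : String) (k : Int) : Decidable (Pre_substring_no_repititions1 s k) := by
  unfold Pre_substring_no_repititions1; infer_instance

def pvWitness_substring_no_repititions1 : String × Int := ("abcabc", 3)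

-- For k < 0 A raises (KeyError or IndexError from negative-index window bookkeeping); B returns 0.
def Raises_substring_no_repititions1 (s : String) (k : Int) : Prop := k < 0
instance (s : String) (k : Int) : Decidable (Raises_substring_no_repititions1 s k) := by
  unfold Raises_substring_no_repititions1; infer_instance

def pvRaiseWitness_substring_no_repititions1 : String × Int := ("ab", -1)
def pvRaiseWitnessOut_substring_no_repititions1 : Int := 0

def Spec_substring_no_repititions1 (s : String) (k : Int) (out : Int) : Prop :=
  out = substring_no_repititions1_alt s k
instance (s : String) (k : Int) (out : Int) : Decidable (Spec_substring_no_repititions1 s k out) := by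
  unfold Spec_substring_no_repititions1; infer_instance

-- ===== CLAIM (what is proved, stated in full; the proofs are below) =====
def Claim_equal_substring_no_repititions1 : Prop := ∀ (s : String) (k : Int), Dom_substring_no_repititions1 s k → Pre_substring_no_repititions1 s k → Spec_substring_no_repititions1 s k (substring_no_repititions1 s k)

def Claim_raises_substring_no_repititions1 : Prop := (∀ (s : String) (k : Int), Dom_substring_no_repititions1 s k → Raises_substring_no_repititions1 s k → ¬ Pre_substring_no_repititions1 s k) ∧ (Dom_substring_no_repititions1 (pvRaiseWitness_substring_no_repititions1.1) (pvRaiseWitness_substring_no_repititions1.2) ∧ Raises_substring_no_repititions1 (pvRaiseWitness_substring_no_repititions1.1) (pvRaiseWitness_substring_no_repititions1.2) ∧ substring_no_repititions1_alt (pvRaiseWitness_substring_no_repititions1.1) (pvRaiseWitness_substring_no_repititions1.2) = pvRaiseWitnessOut_substring_no_repititions1)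

-- ===== LEMMAS AND PROOFS =====

-- d holds exactly the positive character counts of the current window w
def pvInv (d : PySem.Dict Char Int) (w : List Char) : Prop :=
  d.keys.Nodup ∧ ∀ c, d.get? c = if 0 < w.count c then some ((w.count c : Nat) : Int) else none

theorem pvInv_empty : pvInv PySem.Dict.empty [] := by
  constructor
  · exact PySem.Dict.nodup_keys_empty
  · intro c; simp [PySem.Dict.get?_empty]

theorem pvAddChar_inv (d : PySem.Dict Char Int) (w : List Char) (c : Char)
    (h : pvInv d w) : pvInv (pvAddChar d c) (w ++ [c]) := by
  obtain ⟨hnd, hget⟩ := h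
  refine ⟨?_, ?_⟩
  · unfold pvAddChar; split_ifs <;> exact PySem.Dict.nodup_keys_insert _ _ _ hnd
  · intro c'
    have hcount : (w ++ [c]).count c' = w.count c' + (if c' = c then 1 else 0) := by
      rw [List.count_append]
      congr 1
      by_cases h : c' = c <;> simp [List.count_cons, h] <;> exact fun hh => h hh.symm
    unfold pvAddChar
    by_cases hcc : c' = c
    · subst hcc
      by_cases hc : d.contains c'
      · have hpos : 0 < w.count c' := by
          by_contra hnp
          have := hget c'
          rw [if_neg hnp] at this
          rw [PySem.Dict.contains_eq_isSome_get?, this] at hc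
          simp at hc
        rw [if_pos hc, PySem.Dict.get?_insert_self]
        have : d.getD c' 0 = ((w.count c' : Nat) : Int) := by
          rw [PySem.Dict.getD_eq_get?_getD, hget c', if_pos hpos]; rfl
        rw [this, hcount]
        simp
      · have hz : w.count c' = 0 := by
          by_contra hnz
          have hpos : 0 < w.count c' := Nat.pos_of_ne_zero hnz
          have := hget c'
          rw [if_pos hpos] at this
          rw [PySem.Dict.contains_eq_isSome_get?, this] at hc
          simp at hc
        rw [if_neg hc, PySem.Dict.get?_insert_self, hcount, hz]
        simp
    · have hins : ∀ v, (d.insert c v).get? c' = d.get? c' := fun v =>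
        PySem.Dict.get?_insert_of_ne d v hcc
      have hc2 : (w ++ [c]).count c' = w.count c' := by
        rw [hcount, if_neg hcc]; omega
      rw [hc2]
      by_cases hc : d.contains c <;> simp [hc, hins, hget c']

theorem pvFind?_filter {α : Type} (q p : α → Bool) (l : List α) (h : ∀ x, q x → p x) :
    List.find? q (l.filter p) = List.find? q l := by
  induction l with
  | nil => rfl
  | cons a l ih =>
      by_cases hq : q a
      · rw [List.filter_cons, if_pos (h a hq)]
        simp [hq]
      · rw [List.filter_cons]
        split <;> simp [hq, ih]

theorem pvGet?_erase_self (d : PySem.Dict Char Int) (c : Char) :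
    (d.erase c).get? c = none := by
  simp only [PySem.Dict.erase, PySem.Dict.get?]
  rw [List.find?_eq_none.mpr]
  · rfl
  · intro x hx
    have := List.of_mem_filter hx
    simpa using this

theorem pvGet?_erase_of_ne (d : PySem.Dict Char Int) (c c' : Char) (h : c' ≠ c) :
    (d.erase c).get? c' = d.get? c' := by
  simp only [PySem.Dict.erase, PySem.Dict.get?]
  rw [pvFind?_filter]
  intro x hx
  simp at hx ⊢
  rw [hx]
  exact h

theorem pvNodup_keys_erase (d : PySem.Dict Char Int) (c : Char) (h : d.keys.Nodup) :
    (d.erase c).keys.Nodup := by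
  simp only [PySem.Dict.erase, PySem.Dict.keys] at *
  exact h.sublist (List.Sublist.map _ List.filter_sublist)

-- general second half: from pvInv d1 (cold :: w'), the decrement/delete steps give pvInv _ w'
theorem pvDecDel_inv (d1 : PySem.Dict Char Int) (cold : Char) (w' : List Char)
    (h : pvInv d1 (cold :: w')) :
    pvInv (let d2 := d1.insert cold (d1.getD cold 0 - 1);
           if d2.getD cold 0 = 0 then d2.erase cold else d2) w' := by
  obtain ⟨hnd, hget⟩ := h
  have hcnt : (cold :: w').count cold = w'.count cold + 1 := by simp
  have hgd : d1.getD cold 0 = ((w'.count cold : Nat) : Int) + 1 := by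
    rw [PySem.Dict.getD_eq_get?_getD, hget cold, if_pos (by omega), hcnt]
    push_cast; rfl
  have hg2 : (d1.insert cold (d1.getD cold 0 - 1)).getD cold 0 = ((w'.count cold : Nat) : Int) := by
    rw [PySem.Dict.getD_eq_get?_getD, PySem.Dict.get?_insert_self, hgd]
    simp
  have hnd2 : (d1.insert cold (d1.getD cold 0 - 1)).keys.Nodup :=
    PySem.Dict.nodup_keys_insert _ _ _ hnd
  simp only
  split_ifs with hz
  · -- count cold = 0, erase
    have hz' : w'.count cold = 0 := by
      rw [hg2] at hz; exact_mod_cast hz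
    refine ⟨pvNodup_keys_erase _ _ hnd2, fun c' => ?_⟩
    by_cases hcc : c' = cold
    · subst hcc; rw [pvGet?_erase_self, if_neg (by omega)]
    · rw [pvGet?_erase_of_ne _ _ _ hcc, PySem.Dict.get?_insert_of_ne _ _ hcc, hget c']
      have : (cold :: w').count c' = w'.count c' := by simp [List.count_cons]; exact fun hh => hcc hh.symm
      rw [this]
  · refine ⟨hnd2, fun c' => ?_⟩
    by_cases hcc : c' = cold
    · subst hcc
      have hpos : 0 < w'.count c' := by
        by_contra hnp
        have : w'.count c' = 0 := by omega
        rw [hg2, this] at hz; simp at hz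
      rw [PySem.Dict.get?_insert_self, hgd, if_pos hpos]
      simp
    · rw [PySem.Dict.get?_insert_of_ne _ _ hcc, hget c']
      have : (cold :: w').count c' = w'.count c' := by simp [List.count_cons]; exact fun hh => hcc hh.symm
      rw [this]

theorem pvDictStep_inv (d : PySem.Dict Char Int) (c₀ : Char) (m : List Char) (cnew : Char)
    (h : pvInv d (c₀ :: m)) : pvInv (pvDictStep d cnew c₀) (m ++ [cnew]) := by
  have h1 : pvInv (pvAddChar d cnew) (c₀ :: (m ++ [cnew])) := by
    have := pvAddChar_inv d (c₀ :: m) cnew h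
    simpa using this
  exact pvDecDel_inv _ _ _ h1

theorem pvDictStep_inv0 (d : PySem.Dict Char Int) (c : Char)
    (h : pvInv d []) : pvInv (pvDictStep d c c) [] := by
  have h1 : pvInv (pvAddChar d c) (c :: ([] : List Char)) := by
    have := pvAddChar_inv d [] c h
    simpa using this
  exact pvDecDel_inv _ _ _ h1

theorem pvFold_addChar_inv (l : List Char) (d : PySem.Dict Char Int) (w : List Char)
    (h : pvInv d w) : pvInv (l.foldl pvAddChar d) (w ++ l) := by
  induction l generalizing d w with
  | nil => simpa using h
  | cons a l ih =>
      have := ih (pvAddChar d a) (w ++ [a]) (pvAddChar_inv d w a h)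
      simpa using this

theorem pvInv_size (d : PySem.Dict Char Int) (w : List Char) (h : pvInv d w) :
    d.size = (PySem.Set.ofList w).length := by
  obtain ⟨hnd, hget⟩ := h
  have hmem : ∀ c, c ∈ d.keys ↔ c ∈ PySem.Set.ofList w := by
    intro c
    rw [PySem.Set.mem_ofList]
    constructor
    · intro hc
      have hiff := PySem.Dict.get?_eq_none_iff_not_mem_keys (d := d) (k := c)
      by_contra hw
      have hz : w.count c = 0 := List.count_eq_zero.mpr hw
      have hn : d.get? c = none := by rw [hget c, if_neg (by omega)]
      exact (hiff.mp hn) hc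
    · intro hw
      have hpos : 0 < w.count c := List.count_pos_iff.mpr hw
      by_contra hc
      have hiff := PySem.Dict.get?_eq_none_iff_not_mem_keys (d := d) (k := c)
      have hn : d.get? c = none := hiff.mpr hc
      rw [hget c, if_pos hpos] at hn
      simp at hn
  have hperm : d.keys.Perm (PySem.Set.ofList w) :=
    (List.perm_ext_iff_of_nodup hnd (PySem.Set.nodup_ofList w)).mpr hmem
  have : d.keys.length = (PySem.Set.ofList w).length := hperm.length_eq
  simpa [PySem.Dict.size, PySem.Dict.keys] using this

theorem pvB_eval (cs : List Char) (K : Nat) (hK : K ≤ cs.length) :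
    (PySem.List.pyRange 0 ((cs.length : Int) - (K : Int) + 1) 1).foldl
      (fun count i =>
        if ((PySem.Set.ofList (PySem.List.slice cs (some i) (some (i + (K : Int))))).length : Int) = (K : Int)
        then count + 1 else count) 0
    = (((List.range (cs.length - K + 1)).countP
          (fun j => (PySem.Set.ofList ((cs.drop j).take K)).length == K)) : Int) := by
  have hb : (cs.length : Int) - (K : Int) + 1 = ((cs.length - K + 1 : Nat) : Int) := by
    push_cast [Nat.cast_sub hK]; ring
  rw [hb, PySem.List.pyRange_zero_natCast, List.foldl_map]
  have := PySem.List.foldl_count_if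
    (fun j : Nat => ((PySem.Set.ofList ((cs.drop j).take K)).length : Int) == (K : Int))
    (List.range (cs.length - K + 1)) 0
  rw [PySem.List.foldl_congr_mem _ _
    (fun (count : Int) (j : Nat) =>
      if ((PySem.Set.ofList ((cs.drop j).take K)).length : Int) == (K : Int) then count + 1 else count) 0 ?_]
  · rw [this]
    simp only [zero_add]
    congr 1
    apply List.countP_congr
    intro j _
    constructor
    · intro hj; simp at hj ⊢; exact_mod_cast hj
    · intro hj; simp at hj ⊢; exact_mod_cast hj
  · intro acc j hj
    have : PySem.List.slice cs (some (j : Int)) (some ((j : Int) + (K : Int))) = (cs.drop j).take K :=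
      PySem.List.slice_natCast_add cs j K
    rw [this]
    simp

theorem pv_loopA (cs : List Char) (K : Nat) (hK : K ≤ cs.length) :
    ∀ (t j : Nat), j + K + t = cs.length → ∀ (d : PySem.Dict Char Int) (mc : Int),
    pvInv d ((cs.drop j).take K) →
    ((PySem.List.pyRange ((j + K : Nat) : Int) ((cs.length : Nat) : Int) 1).foldl
        (pvStepA cs (K : Int)) (d, mc)).2
      = mc + ((List.range' (j+1) t).countP
          (fun j' => (PySem.Set.ofList ((cs.drop j').take K)).length == K) : Int) := by
  intro t
  induction t with
  | zero =>
      intro j hj d mc hinv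
      have hje : (j + K : Nat) = cs.length := by omega
      rw [hje]
      simp [PySem.List.pyRange]
  | succ t ih =>
      intro j hj d mc hinv
      have hlt : j + K < cs.length := by omega
      have hjlt : j < cs.length := by omega
      have hcons : PySem.List.pyRange ((j + K : Nat) : Int) ((cs.length : Nat) : Int) 1
          = ((j + K : Nat) : Int) :: PySem.List.pyRange (((j + K : Nat) : Int) + 1) ((cs.length : Nat) : Int) 1 :=
        PySem.List.pyRange_one_cons (by exact_mod_cast hlt)
      rw [hcons, List.foldl_cons]
      -- evaluate the step
      have hnew : PySem.List.pyGetD cs ((j + K : Nat) : Int) ' ' = cs[j + K] := by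
        rw [PySem.List.pyGetD_natCast]
        exact List.getD_eq_getElem cs ' ' hlt
      have hsub : ((j + K : Nat) : Int) - (K : Int) = ((j : Nat) : Int) := by push_cast; ring
      have hold : PySem.List.pyGetD cs (((j + K : Nat) : Int) - (K : Int)) ' ' = cs[j] := by
        rw [hsub, PySem.List.pyGetD_natCast]
        exact List.getD_eq_getElem cs ' ' hjlt
      have hinv' : pvInv (pvDictStep d cs[j + K] cs[j]) ((cs.drop (j+1)).take K) := by
        rcases Nat.eq_zero_or_pos K with hK0 | hKpos
        · subst hK0
          have h1 : cs[j + 0] = cs[j] := by congr 1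
          rw [h1]
          simp only [List.take_zero] at hinv ⊢
          exact pvDictStep_inv0 d cs[j] hinv
        · have hmw : (cs.drop j).take K = cs[j] :: (cs.drop (j+1)).take (K-1) := by
            rw [List.drop_eq_getElem_cons hjlt]
            rw [show K = (K-1)+1 by omega, List.take_succ_cons]
            simp only [Nat.add_sub_cancel]
          have hw' : (cs.drop (j+1)).take K = ((cs.drop (j+1)).take (K-1)) ++ [cs[j + K]] := by
            conv_lhs => rw [show K = (K-1)+1 by omega]
            rw [List.take_add_one]
            congr 1
            rw [List.getElem?_drop, show j+1+(K-1) = j+K by omega,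
              List.getElem?_eq_getElem hlt]
            rfl
          rw [hmw] at hinv
          rw [hw']
          exact pvDictStep_inv d cs[j] _ cs[j + K] hinv
      have hstep : pvStepA cs (K : Int) (d, mc) ((j + K : Nat) : Int)
          = (pvDictStep d cs[j + K] cs[j],
             if ((PySem.Set.ofList ((cs.drop (j+1)).take K)).length == K)
             then mc + 1 else mc) := by
        unfold pvStepA
        rw [hnew, hold]
        simp only
        congr 1
        rw [pvInv_size _ _ hinv']
        by_cases hc : (PySem.Set.ofList ((cs.drop (j+1)).take K)).length = K
        · rw [if_pos (by exact_mod_cast hc), if_pos (by simpa using hc)]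
        · rw [if_neg (by exact_mod_cast hc), if_neg (by simpa using hc)]
      rw [hstep]
      have hcast : ((j + K : Nat) : Int) + 1 = (((j+1) + K : Nat) : Int) := by push_cast; ring
      rw [hcast]
      rw [ih (j+1) (by omega) _ _ hinv']
      rw [List.range'_succ, List.countP_cons]
      by_cases hp : ((PySem.Set.ofList ((cs.drop (j+1)).take K)).length == K)
      · rw [if_pos hp]
        simp only [hp]
        push_cast
        ring
      · rw [if_neg hp]
        simp only [Bool.not_eq_true] at hp
        simp only [hp]
        push_cast
        ring

-- ===== VERDICT (by name: the statement is the Claim_ definition above) =====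
theorem pv_init_inv (cs : List Char) (K : Nat) (hK : K ≤ cs.length) :
    pvInv ((PySem.List.pyRange 0 ((K : Nat) : Int) 1).foldl
      (fun h i => pvAddChar h (PySem.List.pyGetD cs i ' ')) PySem.Dict.empty) (cs.take K) := by
  have hlen : PySem.List.len (cs.take K) = ((K : Nat) : Int) := by
    simp [PySem.List.len, List.length_take, Nat.min_eq_left hK]
  have hcong : (PySem.List.pyRange 0 ((K : Nat) : Int) 1).foldl
      (fun h i => pvAddChar h (PySem.List.pyGetD cs i ' ')) PySem.Dict.empty
      = (PySem.List.pyRange 0 (PySem.List.len (cs.take K)) 1).foldl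
      (fun h i => pvAddChar h (PySem.List.pyGetD (cs.take K) i ' ')) PySem.Dict.empty := by
    rw [hlen]
    apply PySem.List.foldl_congr_mem
    intro acc i hi
    rw [PySem.List.mem_pyRange_one] at hi
    have hi2 : i < (cs.length : Int) := lt_of_lt_of_le hi.2 (by exact_mod_cast hK)
    rw [PySem.List.pyGetD_eq_getElem cs ' ' hi.1 hi2,
        PySem.List.pyGetD_eq_getElem (cs.take K) ' ' hi.1
          (by rw [List.length_take, Nat.min_eq_left hK]; exact hi.2)]
    congr 1
    exact (List.getElem_take).symm
  rw [hcong, PySem.List.foldl_pyRange_pyGetD (cs.take K) ' ' pvAddChar PySem.Dict.empty le_rfl]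
  simpa using pvFold_addChar_inv (cs.take K) PySem.Dict.empty [] pvInv_empty

theorem substring_no_repititions1_spec : Claim_equal_substring_no_repititions1 := by
  intro s k _ hpre
  unfold Spec_substring_no_repititions1
  obtain ⟨K, rfl⟩ : ∃ K : Nat, k = (K : Int) := ⟨k.toNat, (Int.toNat_of_nonneg hpre).symm⟩
  unfold substring_no_repititions1 substring_no_repititions1_alt
  set cs := s.toList with hcs
  by_cases hgt : ((K : Nat) : Int) > (cs.length : Int)
  · rw [if_pos hgt, if_pos (Or.inl hgt)]
  · rw [if_neg hgt, if_neg (by push_neg; exact ⟨not_lt.mp hgt, by positivity⟩)]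
    have hK : K ≤ cs.length := by exact_mod_cast not_lt.mp hgt
    have hinit := pv_init_inv cs K hK
    -- A's main loop
    have hA := pv_loopA cs K hK (cs.length - K) 0 (by omega) _
      (if ((((PySem.List.pyRange 0 ((K : Nat) : Int) 1).foldl
        (fun h i => pvAddChar h (PySem.List.pyGetD cs i ' ')) PySem.Dict.empty).size : Nat) : Int)
        = ((K : Nat) : Int) then 1 else 0)
      (by simpa using hinit)
    have hzero : ((0 + K : Nat) : Int) = ((K : Nat) : Int) := by norm_num
    rw [hzero] at hA
    rw [hA, pvB_eval cs K hK]
    -- now pure counting arithmetic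
    have hsz : (((PySem.List.pyRange 0 ((K : Nat) : Int) 1).foldl
        (fun h i => pvAddChar h (PySem.List.pyGetD cs i ' ')) PySem.Dict.empty).size : Nat)
        = (PySem.Set.ofList (cs.take K)).length := by
      have := pvInv_size _ _ hinit
      simpa using this
    rw [hsz]
    have hrange : List.range (cs.length - K + 1) = 0 :: List.range' 1 (cs.length - K) := by
      rw [List.range_eq_range', List.range'_succ]
    rw [hrange, List.countP_cons]
    simp only [List.drop_zero]
    by_cases hp : (PySem.Set.ofList (cs.take K)).length = K
    · rw [if_pos (by exact_mod_cast hp)]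
      simp only [hp, beq_self_eq_true, if_pos]
      push_cast
      ring
    · rw [if_neg (by exact_mod_cast hp)]
      have : ((PySem.Set.ofList (cs.take K)).length == K) = false := by
        simpa using hp
      simp only [this]
      push_cast
      ring

@[simp] theorem substring_no_repititions1_raises : Claim_raises_substring_no_repititions1 := by
  unfold Claim_raises_substring_no_repititions1
  exact ⟨fun s k _ hr hp => absurd hp (by simpa [Pre_substring_no_repititions1, Raises_substring_no_repititions1] using not_le.mpr hr), by decide⟩
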